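-- pv_equiv track=rewrite | github.com/VISHAL-SAHU-KUMAR/sih25 | ai/symptom-checker/backend/symptom_analysis.py | generate_clarifying_questions
-- ===== SOURCE A (Python) =====
-- from typing import List, Dict, Any
--
-- def generate_clarifying_questions(symptoms: List[str], user_input: str) -> List[str]:
--     """Generate relevant clarifying questions."""
--     questions = []
--     user_input_lower = user_input.lower()
--
--     # General clarifying questions based on symptoms
--     if any(term in user_input_lower for term in ['pain', 'ache', 'hurt']):
--         questions.extend([
--             "On a scale of 1-10, how would you rate the pain intensity?",
--             "Is the pain constant or does it come and go?",
--             "Does anything make the pain better or worse?"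
--         ])
--
--     if any(term in user_input_lower for term in ['fever', 'temperature']):
--         questions.extend([
--             "Have you measured your temperature? What was the reading?",
--             "Are you experiencing chills or night sweats?",
--             "How long have you had the fever?"
--         ])
--
--     if any(term in user_input_lower for term in ['cough', 'breathing', 'chest']):
--         questions.extend([
--             "Are you experiencing any difficulty breathing?",
--             "Is the cough producing any phlegm or blood?",
--             "Does the cough interfere with your sleep?"
--         ])
--
--     if any(term in user_input_lower for term in ['headache', 'head']):
--         questions.extend([
--             "Where exactly is the headache located?",
--             "Are you experiencing any vision changes or sensitivity to light?",
--             "Have you had similar headaches before?"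
--         ])
--
--     if any(term in user_input_lower for term in ['stomach', 'nausea', 'abdominal']):
--         questions.extend([
--             "Have you had any recent changes in diet?",
--             "Are you experiencing any vomiting or diarrhea?",
--             "When did you last have a normal bowel movement?"
--         ])
--
--     # Duration questions if not mentioned
--     if not any(term in user_input_lower for term in ['day', 'week', 'month', 'hour', 'ago', 'since']):
--         questions.append("When did these symptoms first start?")
--
--     # Context questions
--     questions.extend([
--         "Have you traveled recently or been exposed to anyone who was ill?",
--         "Are you currently taking any medications or supplements?",
--         "Do you have any known allergies or medical conditions?"
--     ])
--
--     # Remove duplicates and limit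
--     return list(dict.fromkeys(questions))[:5]
-- ===== SOURCE B (Python) =====
-- # Budgeted recursive emitter: instead of building the full question list and then
-- # deduping/slicing, recurse over the rules table with a remaining-budget counter,
-- # emitting at most 5 questions and stopping early once the budget is exhausted.
-- _RULES = [
--     (('pain', 'ache', 'hurt'), [
--         "On a scale of 1-10, how would you rate the pain intensity?",
--         "Is the pain constant or does it come and go?",
--         "Does anything make the pain better or worse?",
--     ]),
--     (('fever', 'temperature'), [
--         "Have you measured your temperature? What was the reading?",
--         "Are you experiencing chills or night sweats?",
--         "How long have you had the fever?",
--     ]),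
--     (('cough', 'breathing', 'chest'), [
--         "Are you experiencing any difficulty breathing?",
--         "Is the cough producing any phlegm or blood?",
--         "Does the cough interfere with your sleep?",
--     ]),
--     (('headache', 'head'), [
--         "Where exactly is the headache located?",
--         "Are you experiencing any vision changes or sensitivity to light?",
--         "Have you had similar headaches before?",
--     ]),
--     (('stomach', 'nausea', 'abdominal'), [
--         "Have you had any recent changes in diet?",
--         "Are you experiencing any vomiting or diarrhea?",
--         "When did you last have a normal bowel movement?",
--     ]),
-- ]
--
-- _DURATION_TERMS = ('day', 'week', 'month', 'hour', 'ago', 'since')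
--
-- _CONTEXT = [
--     "Have you traveled recently or been exposed to anyone who was ill?",
--     "Are you currently taking any medications or supplements?",
--     "Do you have any known allergies or medical conditions?",
-- ]
--
--
-- def generate_clarifying_questions(symptoms, user_input):
--     low = user_input.lower()
--
--     def emit(rules, budget):
--         """Yield at most `budget` questions from the remaining rules, then the suffix."""
--         if budget == 0:
--             return []
--         if not rules:
--             suffix = []
--             if not any(t in low for t in _DURATION_TERMS):
--                 suffix.append("When did these symptoms first start?")
--             suffix += _CONTEXT
--             return suffix[:budget]
--         (kws, block), rest = rules[0], rules[1:]
--         if any(k in low for k in kws):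
--             head = block[:budget]
--             return head + emit(rest, budget - len(head))
--         return emit(rest, budget)
--
--     return emit(_RULES, 5)
-- ===== Notes on version B (the rewrite author's own statement) =====
-- stated objective: alternative
-- what changed: Replaced build-everything-then-dedupe-and-slice with a budgeted recursive emitter over a rules table: it carries a remaining-budget counter, emits at most 5 questions, stops recursing as soon as the budget is exhausted (later rules are never examined), and never performs the dict.fromkeys dedup (provably a no-op since all candidate questions are pairwise distinct).
import Mathlib
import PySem

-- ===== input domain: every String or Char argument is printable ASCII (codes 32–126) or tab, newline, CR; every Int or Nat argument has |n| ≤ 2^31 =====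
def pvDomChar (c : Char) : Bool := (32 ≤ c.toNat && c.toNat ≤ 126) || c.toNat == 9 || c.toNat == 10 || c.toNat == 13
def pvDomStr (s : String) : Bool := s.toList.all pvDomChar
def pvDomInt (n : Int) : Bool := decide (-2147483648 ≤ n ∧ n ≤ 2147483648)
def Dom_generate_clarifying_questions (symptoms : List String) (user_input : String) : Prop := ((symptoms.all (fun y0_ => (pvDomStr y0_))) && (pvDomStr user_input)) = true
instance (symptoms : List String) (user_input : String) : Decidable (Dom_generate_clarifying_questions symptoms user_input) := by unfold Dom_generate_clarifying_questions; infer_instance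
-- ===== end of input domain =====

-- B replaces A's build-all + dedup + slice with a budgeted recursive emitter that
-- produces at most 5 questions and stops early once the budget is exhausted.

-- ===== PORT A =====
def generate_clarifying_questions (symptoms : List String) (user_input : String) : List String :=
  let user_input_lower := PySem.Str.lower user_input
  let questions : List String := []
  let questions :=
    if ["pain", "ache", "hurt"].any (fun t => PySem.Str.isIn t user_input_lower) then
      questions ++ ["On a scale of 1-10, how would you rate the pain intensity?",
                    "Is the pain constant or does it come and go?",
                    "Does anything make the pain better or worse?"]
    else questions
  let questions :=
    if ["fever", "temperature"].any (fun t => PySem.Str.isIn t user_input_lower) then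
      questions ++ ["Have you measured your temperature? What was the reading?",
                    "Are you experiencing chills or night sweats?",
                    "How long have you had the fever?"]
    else questions
  let questions :=
    if ["cough", "breathing", "chest"].any (fun t => PySem.Str.isIn t user_input_lower) then
      questions ++ ["Are you experiencing any difficulty breathing?",
                    "Is the cough producing any phlegm or blood?",
                    "Does the cough interfere with your sleep?"]
    else questions
  let questions :=
    if ["headache", "head"].any (fun t => PySem.Str.isIn t user_input_lower) then
      questions ++ ["Where exactly is the headache located?",
                    "Are you experiencing any vision changes or sensitivity to light?",
                    "Have you had similar headaches before?"]
    else questions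
  let questions :=
    if ["stomach", "nausea", "abdominal"].any (fun t => PySem.Str.isIn t user_input_lower) then
      questions ++ ["Have you had any recent changes in diet?",
                    "Are you experiencing any vomiting or diarrhea?",
                    "When did you last have a normal bowel movement?"]
    else questions
  let questions :=
    if !(["day", "week", "month", "hour", "ago", "since"].any (fun t => PySem.Str.isIn t user_input_lower)) then
      questions ++ ["When did these symptoms first start?"]
    else questions
  let questions :=
    questions ++ ["Have you traveled recently or been exposed to anyone who was ill?",
                  "Are you currently taking any medications or supplements?",
                  "Do you have any known allergies or medical conditions?"]
  PySem.List.slice (PySem.List.dedup questions) none (some 5)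

-- ===== PORT B =====
def gcqRules : List (List String × List String) :=
  [(["pain", "ache", "hurt"],
    ["On a scale of 1-10, how would you rate the pain intensity?",
     "Is the pain constant or does it come and go?",
     "Does anything make the pain better or worse?"]),
   (["fever", "temperature"],
    ["Have you measured your temperature? What was the reading?",
     "Are you experiencing chills or night sweats?",
     "How long have you had the fever?"]),
   (["cough", "breathing", "chest"],
    ["Are you experiencing any difficulty breathing?",
     "Is the cough producing any phlegm or blood?",
     "Does the cough interfere with your sleep?"]),
   (["headache", "head"],
    ["Where exactly is the headache located?",
     "Are you experiencing any vision changes or sensitivity to light?",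
     "Have you had similar headaches before?"]),
   (["stomach", "nausea", "abdominal"],
    ["Have you had any recent changes in diet?",
     "Are you experiencing any vomiting or diarrhea?",
     "When did you last have a normal bowel movement?"])]

def gcqDurationTerms : List String := ["day", "week", "month", "hour", "ago", "since"]

def gcqContext : List String :=
  ["Have you traveled recently or been exposed to anyone who was ill?",
   "Are you currently taking any medications or supplements?",
   "Do you have any known allergies or medical conditions?"]

-- emit(rules, budget): block[:budget] / suffix[:budget] have a nonnegative bound,
-- so Python's slice is exactly List.take here.
def gcqEmit (low : String) (rules : List (List String × List String)) (budget : Nat) : List String :=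
  if budget = 0 then []
  else
    match rules with
    | [] =>
        (((if !(gcqDurationTerms.any (fun t => PySem.Str.isIn t low)) then
            ["When did these symptoms first start?"] else []) : List String) ++ gcqContext).take budget
    | (kws, block) :: rest =>
        if kws.any (fun k => PySem.Str.isIn k low) then
          let head := block.take budget
          head ++ gcqEmit low rest (budget - head.length)
        else gcqEmit low rest budget

def generate_clarifying_questions_alt (symptoms : List String) (user_input : String) : List String :=
  gcqEmit (PySem.Str.lower user_input) gcqRules 5

-- ===== PRECONDITION & SPEC =====
def Spec_generate_clarifying_questions (symptoms : List String) (user_input : String) (out : List String) : Prop := out = generate_clarifying_questions_alt symptoms user_input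
instance (symptoms : List String) (user_input : String) (out : List String) : Decidable (Spec_generate_clarifying_questions symptoms user_input out) := by unfold Spec_generate_clarifying_questions; infer_instance

-- ===== CLAIM =====
def Claim_equal_generate_clarifying_questions : Prop := ∀ (symptoms : List String) (user_input : String), Dom_generate_clarifying_questions symptoms user_input → Spec_generate_clarifying_questions symptoms user_input (generate_clarifying_questions symptoms user_input)

-- ===== LEMMAS AND PROOFS =====

-- The budgeted emitter equals "flatten the matched blocks, append the suffix, take budget".
theorem gcqEmit_eq_take (low : String) (rules : List (List String × List String)) :
    ∀ budget : Nat,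
    gcqEmit low rules budget =
      ((rules.filter (fun r => r.1.any (fun k => PySem.Str.isIn k low))).flatMap (fun r => r.2) ++
        (((if !(gcqDurationTerms.any (fun t => PySem.Str.isIn t low)) then
            ["When did these symptoms first start?"] else []) : List String) ++ gcqContext)).take budget := by
  induction rules with
  | nil =>
      intro budget
      by_cases h0 : budget = 0
      · simp [gcqEmit, h0]
      · simp [gcqEmit, h0]
  | cons r rest ih =>
      obtain ⟨kws, block⟩ := r
      intro budget
      by_cases h0 : budget = 0
      · simp [gcqEmit, h0]
      · rw [gcqEmit, if_neg h0]
        by_cases hc : kws.any (fun k => PySem.Str.isIn k low) = true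
        · rw [if_pos hc, List.filter_cons_of_pos (by simpa using hc), List.flatMap_cons,
            List.append_assoc, List.take_append]
          simp only [ih, List.length_take]
          congr 2
          omega
        · rw [if_neg hc, List.filter_cons_of_neg (by simpa using hc)]
          exact ih budget

-- Both outputs depend on user_input only through six Boolean keyword tests; this
-- shape lemma proves equality for every assignment of those Booleans.
theorem gcq_shape_eq (b1 b2 b3 b4 b5 b6 : Bool) :
    (PySem.List.slice (PySem.List.dedup
      ((((((((([] : List String) ++
        (if b1 then ["On a scale of 1-10, how would you rate the pain intensity?",
                     "Is the pain constant or does it come and go?",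
                     "Does anything make the pain better or worse?"] else [])) ++
        (if b2 then ["Have you measured your temperature? What was the reading?",
                     "Are you experiencing chills or night sweats?",
                     "How long have you had the fever?"] else [])) ++
        (if b3 then ["Are you experiencing any difficulty breathing?",
                     "Is the cough producing any phlegm or blood?",
                     "Does the cough interfere with your sleep?"] else [])) ++
        (if b4 then ["Where exactly is the headache located?",
                     "Are you experiencing any vision changes or sensitivity to light?",
                     "Have you had similar headaches before?"] else [])) ++
        (if b5 then ["Have you had any recent changes in diet?",
                     "Are you experiencing any vomiting or diarrhea?",
                     "When did you last have a normal bowel movement?"] else [])) ++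
        (if !b6 then ["When did these symptoms first start?"] else [])) ++ gcqContext)))
      none (some 5))
    =
    (((gcqRules.zip [b1, b2, b3, b4, b5]).filter (fun r => r.2)).flatMap (fun r => r.1.2) ++
      ((if !b6 then ["When did these symptoms first start?"] else []) ++ gcqContext)).take 5 := by
  cases b1 <;> cases b2 <;> cases b3 <;> cases b4 <;> cases b5 <;> cases b6 <;> decide

theorem gcq_filter_zip (low : String) :
    (gcqRules.filter (fun r => r.1.any (fun k => PySem.Str.isIn k low))).flatMap (fun r => r.2) =
    (((gcqRules.zip
        [["pain", "ache", "hurt"].any (fun t => PySem.Str.isIn t low),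
         ["fever", "temperature"].any (fun t => PySem.Str.isIn t low),
         ["cough", "breathing", "chest"].any (fun t => PySem.Str.isIn t low),
         ["headache", "head"].any (fun t => PySem.Str.isIn t low),
         ["stomach", "nausea", "abdominal"].any (fun t => PySem.Str.isIn t low)]).filter
       (fun r => r.2)).flatMap (fun r => r.1.2)) := by
  simp only [gcqRules, List.zip, List.zipWith, List.filter_cons, List.filter_nil]
  split_ifs <;> rfl

theorem gcq_A_char (symptoms : List String) (user_input : String) :
    generate_clarifying_questions symptoms user_input =
    (let low := PySem.Str.lower user_input
     PySem.List.slice (PySem.List.dedup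
      ((((((((([] : List String) ++
        (if ["pain", "ache", "hurt"].any (fun t => PySem.Str.isIn t low) then
          ["On a scale of 1-10, how would you rate the pain intensity?",
           "Is the pain constant or does it come and go?",
           "Does anything make the pain better or worse?"] else [])) ++
        (if ["fever", "temperature"].any (fun t => PySem.Str.isIn t low) then
          ["Have you measured your temperature? What was the reading?",
           "Are you experiencing chills or night sweats?",
           "How long have you had the fever?"] else [])) ++
        (if ["cough", "breathing", "chest"].any (fun t => PySem.Str.isIn t low) then
          ["Are you experiencing any difficulty breathing?",
           "Is the cough producing any phlegm or blood?",
           "Does the cough interfere with your sleep?"] else [])) ++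
        (if ["headache", "head"].any (fun t => PySem.Str.isIn t low) then
          ["Where exactly is the headache located?",
           "Are you experiencing any vision changes or sensitivity to light?",
           "Have you had similar headaches before?"] else [])) ++
        (if ["stomach", "nausea", "abdominal"].any (fun t => PySem.Str.isIn t low) then
          ["Have you had any recent changes in diet?",
           "Are you experiencing any vomiting or diarrhea?",
           "When did you last have a normal bowel movement?"] else [])) ++
        (if !(gcqDurationTerms.any (fun t => PySem.Str.isIn t low)) then
          ["When did these symptoms first start?"] else [])) ++ gcqContext)))
      none (some 5)) := by
  unfold generate_clarifying_questions
  simp only [gcqDurationTerms, gcqContext, List.nil_append]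
  split_ifs <;> rfl

-- ===== VERDICT (by name: the statement is the Claim_ definition above) =====
theorem generate_clarifying_questions_spec : Claim_equal_generate_clarifying_questions := by
  intro symptoms user_input _
  unfold Spec_generate_clarifying_questions generate_clarifying_questions_alt
  rw [gcq_A_char, gcqEmit_eq_take, gcq_filter_zip]
  exact gcq_shape_eq _ _ _ _ _ _
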